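-- pv_equiv track=rewrite | github.com/SebastianVintonuke/TDA-Test | Greedy/minimizar_latencia.py | minimizar_latencia
-- ===== SOURCE A (Python) =====
-- def minimizar_latencia(L_deadline, T_tareas):
--
--     tarea_deadline = []
--     for i in range(len(T_tareas)):
--         tarea_deadline.append((T_tareas[i], L_deadline[i]))
--     tarea_deadline.sort(key=lambda t: t[1]) # O(n log n)
--
--     resultado = []
--     S_i = 0
--     for i in tarea_deadline: # O(n)
--         T_i = i[0]
--         D_i = i[1]
--         F_i = S_i + T_i
--         if F_i > D_i:
--             L_i = F_i - D_i
--         else: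
--             L_i = 0
--         resultado.append((T_i, L_i))
--         S_i = F_i
--
--     return resultado
-- ===== SOURCE B (Python) =====
-- def minimizar_latencia(L_deadline, T_tareas):
--     # Selection-based scheduling: no sort; repeatedly pick the pending task with
--     # the earliest deadline (first one on ties) and schedule it next.
--     pendientes = [(T_tareas[i], L_deadline[i]) for i in range(len(T_tareas))]
--     resultado = []
--     tiempo = 0
--     while pendientes:
--         mejor = 0
--         for j in range(1, len(pendientes)):
--             if pendientes[j][1] < pendientes[mejor][1]:
--                 mejor = j
--         t, d = pendientes.pop(mejor)
--         tiempo += t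
--         resultado.append((t, tiempo - d if tiempo > d else 0))
--     return resultado
-- ===== Notes on version B (the rewrite author's own statement) =====
-- stated objective: alternative
-- what changed: B never sorts: instead of A's build-pairs + list.sort + accumulator scan, it does selection-based scheduling, repeatedly scanning the pending tasks for the one with the earliest deadline (first on ties, matching A's stable sort), popping it and emitting its latency with a running clock.
import Mathlib
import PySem

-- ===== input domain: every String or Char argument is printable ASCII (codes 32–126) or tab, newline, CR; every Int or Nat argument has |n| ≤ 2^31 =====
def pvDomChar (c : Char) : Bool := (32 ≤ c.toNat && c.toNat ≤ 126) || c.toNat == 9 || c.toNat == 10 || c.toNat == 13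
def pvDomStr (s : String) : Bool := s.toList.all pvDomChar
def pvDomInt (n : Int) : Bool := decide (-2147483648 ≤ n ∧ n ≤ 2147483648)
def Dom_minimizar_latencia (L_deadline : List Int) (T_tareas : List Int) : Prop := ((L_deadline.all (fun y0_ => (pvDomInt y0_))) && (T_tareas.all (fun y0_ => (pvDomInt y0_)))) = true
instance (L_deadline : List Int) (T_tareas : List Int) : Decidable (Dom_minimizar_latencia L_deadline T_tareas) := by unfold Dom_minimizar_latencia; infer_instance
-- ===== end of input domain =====

-- B replaces A's sort-then-scan by selection-based scheduling: no sort at all — it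
-- repeatedly scans the pending tasks for the one with the earliest deadline (first on
-- ties, matching the stable sort) and schedules it next (alternative algorithm, O(n^2)).

-- ===== PORT A =====
def minimizar_latencia (L_deadline : List Int) (T_tareas : List Int) : List (Int × Int) :=
  -- for i in range(len(T_tareas)): append (T_tareas[i], L_deadline[i]); in-range under Pre_
  let tarea_deadline := (PySem.List.pyRange 0 (PySem.List.len T_tareas) 1).foldl
    (fun acc i => acc ++ [((PySem.List.pyGet? T_tareas i).getD 0, (PySem.List.pyGet? L_deadline i).getD 0)]) []
  let td_sorted := PySem.List.sorted tarea_deadline (fun t => t.2)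
  let r := td_sorted.foldl (fun (st : List (Int × Int) × Int) i =>
      let T_i := i.1
      let D_i := i.2
      let F_i := st.2 + T_i
      let L_i := if F_i > D_i then F_i - D_i else 0
      (st.1 ++ [(T_i, L_i)], F_i)) ([], 0)
  r.1

-- ===== PORT B =====
-- inner for-loop: mejor = index of the first pending task with minimal deadline
-- (pendientes[j] is always in range, so the .getD default is never used)
def pvMejor (pendientes : List (Int × Int)) : Int :=
  (PySem.List.pyRange 1 (PySem.List.len pendientes) 1).foldl
    (fun mejor j =>
      if ((PySem.List.pyGet? pendientes j).getD (0, 0)).2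
           < ((PySem.List.pyGet? pendientes mejor).getD (0, 0)).2
      then j else mejor) 0

-- while pendientes: … pendientes.pop(mejor) …  (pop? is some whenever pendientes ≠ [],
-- since 0 ≤ mejor < len; the none branch is unreachable)
def pvSchedule (pendientes : List (Int × Int)) (tiempo : Int) (resultado : List (Int × Int)) :
    List (Int × Int) :=
  if pendientes = [] then resultado
  else
    match h : PySem.List.pop? pendientes (pvMejor pendientes) with
    | none => resultado
    | some (td, rest) =>
        pvSchedule rest (tiempo + td.1)
          (resultado ++ [(td.1, if tiempo + td.1 > td.2 then tiempo + td.1 - td.2 else 0)])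
termination_by pendientes.length
decreasing_by
  have h2 := PySem.List.length_of_pop?_eq_some _ h
  simp only [] at h2
  simp_all
  omega

def minimizar_latencia_alt (L_deadline : List Int) (T_tareas : List Int) : List (Int × Int) :=
  -- [(T_tareas[i], L_deadline[i]) for i in range(len(T_tareas))]; in-range under Pre_
  let pendientes := (PySem.List.pyRange 0 (PySem.List.len T_tareas) 1).map
    (fun i => ((PySem.List.pyGet? T_tareas i).getD 0, (PySem.List.pyGet? L_deadline i).getD 0))
  pvSchedule pendientes 0 []

-- ===== PRECONDITION & SPEC =====
-- A indexes L_deadline[i] for every i < len(T_tareas): it raises IndexError when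
-- T_tareas is longer than L_deadline, so exactly those inputs are excluded.
def Pre_minimizar_latencia (L_deadline : List Int) (T_tareas : List Int) : Prop :=
  T_tareas.length ≤ L_deadline.length
instance (L_deadline : List Int) (T_tareas : List Int) : Decidable (Pre_minimizar_latencia L_deadline T_tareas) := by unfold Pre_minimizar_latencia; infer_instance

def pvWitness_minimizar_latencia : List Int × List Int := ([3, 1, 4], [2, 2, 1])

def Spec_minimizar_latencia (L_deadline : List Int) (T_tareas : List Int) (out : List (Int × Int)) : Prop := out = minimizar_latencia_alt L_deadline T_tareas
instance (L_deadline : List Int) (T_tareas : List Int) (out : List (Int × Int)) : Decidable (Spec_minimizar_latencia L_deadline T_tareas out) := by unfold Spec_minimizar_latencia; infer_instance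

-- ===== CLAIM (what is proved, stated in full; the proofs are below) =====
def Claim_equal_minimizar_latencia : Prop := ∀ (L_deadline : List Int) (T_tareas : List Int), Dom_minimizar_latencia L_deadline T_tareas → Pre_minimizar_latencia L_deadline T_tareas → Spec_minimizar_latencia L_deadline T_tareas (minimizar_latencia L_deadline T_tareas)

-- ===== LEMMAS AND PROOFS =====

-- latencies of a deadline-ordered task list starting at time s (proof-only helper)
def latScan (s : Int) : List (Int × Int) → List (Int × Int)
  | [] => []
  | p :: ps => (p.1, if s + p.1 > p.2 then s + p.1 - p.2 else 0) :: latScan (s + p.1) ps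

-- stable insert from the LEFT: x goes before the first element with key ≥ key x
def insLE (x : Int × Int) : List (Int × Int) → List (Int × Int)
  | [] => [x]
  | y :: ys => if x.2 ≤ y.2 then x :: y :: ys else y :: insLE x ys

-- insertBy (the right-stable insert behind PySem.List.sorted) commutes with insLE
lemma insertBy_insLE_comm (x y : Int × Int) :
    ∀ (ys : List (Int × Int)),
      PySem.List.insertBy (fun a b => decide (a.2 < b.2)) y (insLE x ys)
      = insLE x (PySem.List.insertBy (fun a b => decide (a.2 < b.2)) y ys) := by
  intro ys
  induction ys with
  | nil =>
    simp only [insLE, PySem.List.insertBy]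
    by_cases h1 : y.2 < x.2 <;> by_cases h2 : x.2 ≤ y.2 <;>
      simp [insLE, h1, h2] <;> omega
  | cons z zs ih =>
    simp only [insLE, PySem.List.insertBy]
    by_cases hxz : x.2 ≤ z.2 <;> by_cases hyz : y.2 < z.2 <;>
      by_cases hyx : y.2 < x.2 <;> by_cases hxy : x.2 ≤ y.2 <;>
      first
        | (simp [insLE, PySem.List.insertBy, hxz, hyz, hyx, hxy, ih]; done)
        | (simp [insLE, PySem.List.insertBy, hxz, hyz, hyx, hxy, ih]; omega)

lemma foldl_insertBy_insLE (x : Int × Int) :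
    ∀ (t : List (Int × Int)) (acc : List (Int × Int)),
      t.foldl (fun acc z => PySem.List.insertBy (fun a b => decide (a.2 < b.2)) z acc) (insLE x acc)
      = insLE x (t.foldl (fun acc z => PySem.List.insertBy (fun a b => decide (a.2 < b.2)) z acc) acc) := by
  intro t
  induction t with
  | nil => intro acc; rfl
  | cons z zs ih => intro acc; simp only [List.foldl_cons, insertBy_insLE_comm, ih]

-- the stable sort, taken one element at a time from the left
lemma sorted_cons (x : Int × Int) (t : List (Int × Int)) :
    PySem.List.sorted (x :: t) (fun p => p.2) = insLE x (PySem.List.sorted t (fun p => p.2)) := by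
  rw [PySem.List.sorted_eq_foldl_insertBy, PySem.List.sorted_eq_foldl_insertBy, List.foldl_cons]
  have : PySem.List.insertBy (fun a b => decide (a.2 < b.2)) x ([] : List (Int × Int)) = insLE x [] := rfl
  rw [this, foldl_insertBy_insLE]

-- pulling the FIRST minimal-deadline element to the front of the stable sort
lemma sorted_select (m : Int × Int) :
    ∀ (l r : List (Int × Int)), (∀ y ∈ l, m.2 < y.2) → (∀ y ∈ r, m.2 ≤ y.2) →
      PySem.List.sorted (l ++ m :: r) (fun p => p.2)
      = m :: PySem.List.sorted (l ++ r) (fun p => p.2) := by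
  intro l
  induction l with
  | nil =>
    intro r _ hr
    rw [List.nil_append, List.nil_append, sorted_cons]
    cases hs : PySem.List.sorted r (fun p => p.2) with
    | nil => rfl
    | cons z zs =>
      have hz : z ∈ r := by
        rw [← PySem.List.mem_sorted r (fun p => p.2) false z, hs]; exact List.mem_cons_self
      simp [insLE, hr z hz]
  | cons x l ih =>
    intro r hl hr
    rw [List.cons_append, sorted_cons, ih r (fun y hy => hl y (List.mem_cons_of_mem x hy)) hr]
    have hx : m.2 < x.2 := hl x List.mem_cons_self
    rw [List.cons_append, sorted_cons]
    simp [insLE, not_le.mpr hx]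

-- the pvMejor foldl invariant: after scanning indices [1, n), mejor is the index of the
-- first minimum of pendientes[0..n)
lemma mejor_inv (pend : List (Int × Int)) :
    ∀ (n : Nat) (_ : 1 ≤ n) (hn2 : n ≤ pend.length),
      ∃ k : Nat, ∃ hk : k < n,
        (PySem.List.pyRange 1 (n : Int) 1).foldl
          (fun mejor j =>
            if ((PySem.List.pyGet? pend j).getD (0, 0)).2
                 < ((PySem.List.pyGet? pend mejor).getD (0, 0)).2
            then j else mejor) 0 = (k : Int)
        ∧ (∀ i : Nat, (hik : i < k) → (pend[k]'(by omega)).2 < (pend[i]'(by omega)).2)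
        ∧ (∀ i : Nat, (hi : i < n) → (pend[k]'(by omega)).2 ≤ (pend[i]'(by omega)).2) := by
  intro n
  induction n with
  | zero => intro h; omega
  | succ n ih =>
    intro _ hlen
    by_cases hn : 1 ≤ n
    · obtain ⟨k, hk, heq, hstrict, hmin⟩ := ih hn (by omega)
      have hstep : PySem.List.pyRange 1 ((n + 1 : Nat) : Int) 1
          = PySem.List.pyRange 1 (n : Int) 1 ++ [(n : Int)] := by
        have : ((n + 1 : Nat) : Int) = (n : Int) + 1 := by push_cast; ring
        rw [this, PySem.List.pyRange_one_succ_right (by exact_mod_cast hn)]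
      rw [hstep, List.foldl_append, heq]
      simp only [List.foldl_cons, List.foldl_nil, PySem.List.pyGet?_natCast]
      have hkl : k < pend.length := by omega
      have hnl : n < pend.length := by omega
      rw [List.getElem?_eq_getElem hkl, List.getElem?_eq_getElem hnl]
      simp only [Option.getD_some]
      by_cases hc : (pend[n]'hnl).2 < (pend[k]'hkl).2
      · refine ⟨n, by omega, by simp [hc], ?_, ?_⟩
        · intro i hi; exact lt_of_lt_of_le hc (hmin i (by omega))
        · intro i hi
          rcases Nat.lt_succ_iff_lt_or_eq.mp hi with h | h
          · exact le_of_lt (lt_of_lt_of_le hc (hmin i h))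
          · subst h; exact le_refl _
      · refine ⟨k, by omega, by simp [hc], hstrict, ?_⟩
        intro i hi
        rcases Nat.lt_succ_iff_lt_or_eq.mp hi with h | h
        · exact hmin i h
        · subst h; omega
    · have hn1 : n = 0 := by omega
      subst hn1
      refine ⟨0, by omega, ?_, by omega, ?_⟩
      · rw [PySem.List.pyRange_one_eq_nil (by norm_num)]; rfl
      · intro i hi
        have : i = 0 := by omega
        subst this; exact le_refl _

-- one step of pvSchedule: it pops exactly the first minimal-deadline element
lemma pvSchedule_step (pend : List (Int × Int)) (hne : pend ≠ []) :
    ∃ k : Nat, ∃ hk : k < pend.length,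
      PySem.List.pop? pend (pvMejor pend) = some (pend[k], pend.eraseIdx k)
      ∧ (∀ i : Nat, (hik : i < k) → (pend[k]'hk).2 < (pend[i]'(by omega)).2)
      ∧ (∀ i : Nat, (hi : i < pend.length) → (pend[k]'hk).2 ≤ (pend[i]'hi).2) := by
  have hlen : 1 ≤ pend.length := by
    cases pend with
    | nil => exact absurd rfl hne
    | cons _ _ => simp
  obtain ⟨k, hk, heq, hstrict, hmin⟩ := mejor_inv pend pend.length hlen (le_refl _)
  have hmej : pvMejor pend = (k : Int) := by
    unfold pvMejor
    simpa using heq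
  exact ⟨k, hk, by rw [hmej]; exact PySem.List.pop?_natCast pend k hk, hstrict, hmin⟩

-- the scheduling loop computes the latency scan of the stable deadline sort
lemma pvSchedule_eq : ∀ (n : Nat) (pend : List (Int × Int)), pend.length ≤ n →
    ∀ (tiempo : Int) (res : List (Int × Int)),
      pvSchedule pend tiempo res = res ++ latScan tiempo (PySem.List.sorted pend (fun p => p.2)) := by
  intro n
  induction n with
  | zero =>
    intro pend hlen tiempo res
    have : pend = [] := List.length_eq_zero_iff.mp (by omega)
    subst this
    rw [pvSchedule]
    rw [PySem.List.sorted_eq_foldl_insertBy]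
    simp [latScan]
  | succ n ih =>
    intro pend hlen tiempo res
    by_cases hne : pend = []
    · subst hne
      rw [pvSchedule]
      rw [PySem.List.sorted_eq_foldl_insertBy]
      simp [latScan]
    · obtain ⟨k, hk, hpop, hstrict, hmin⟩ := pvSchedule_step pend hne
      rw [pvSchedule, if_neg hne]
      split
      · next heq => rw [hpop] at heq; exact absurd heq (by simp)
      · next td rest heq =>
        rw [hpop] at heq
        obtain ⟨h1, h2⟩ := Prod.mk.injEq _ _ _ _ |>.mp (Option.some.inj heq)
        subst h1; subst h2
        have hrl : (pend.eraseIdx k).length ≤ n := by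
          rw [List.length_eraseIdx_of_lt hk]; omega
        rw [ih _ hrl]
        have hdecomp : pend = pend.take k ++ pend[k] :: pend.drop (k + 1) := by
          conv_lhs => rw [← List.take_append_drop k pend]
          rw [List.drop_eq_getElem_cons hk]
        have hsort : PySem.List.sorted pend (fun p => p.2)
            = pend[k] :: PySem.List.sorted (pend.eraseIdx k) (fun p => p.2) := by
          rw [List.eraseIdx_eq_take_drop_succ]
          conv_lhs => rw [hdecomp]
          apply sorted_select
          · intro y hy
            obtain ⟨j, hj, hyj⟩ := List.mem_take_iff_getElem.mp hy
            rw [← hyj]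
            exact hstrict j (by omega)
          · intro y hy
            obtain ⟨i, hi, hyi⟩ := List.mem_iff_getElem.mp (List.mem_of_mem_drop hy)
            rw [← hyi]
            exact hmin i hi
        rw [hsort]
        simp [latScan]

-- (assembly below)
lemma afold_eq_latScan : ∀ (ps : List (Int × Int)) (acc : List (Int × Int)) (s : Int),
    (ps.foldl (fun (st : List (Int × Int) × Int) i =>
      (st.1 ++ [(i.1, if st.2 + i.1 > i.2 then st.2 + i.1 - i.2 else 0)], st.2 + i.1)) (acc, s)).1
    = acc ++ latScan s ps := by
  intro ps
  induction ps with
  | nil => intro acc s; simp [latScan]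
  | cons p ps ih => intro acc s; simp [latScan, ih]

lemma build_eq_zip_take (L T : List Int) (h : T.length ≤ L.length) :
    ∀ (n : Nat), n ≤ T.length →
    (PySem.List.pyRange 0 n 1).foldl
      (fun acc i => acc ++ [((PySem.List.pyGet? T i).getD 0, (PySem.List.pyGet? L i).getD 0)]) []
    = (T.zip L).take n := by
  intro n
  induction n with
  | zero => intro _; simp
  | succ n ih =>
    intro hn
    have hrange : PySem.List.pyRange 0 ((n : Int) + 1) 1
        = PySem.List.pyRange 0 n 1 ++ [(n : Int)] :=
      PySem.List.pyRange_one_succ_right (by positivity)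
    have hcast : ((n + 1 : Nat) : Int) = (n : Int) + 1 := by push_cast; ring
    rw [hcast, hrange, List.foldl_append, ih (by omega)]
    have hTn : n < T.length := by omega
    have hLn : n < L.length := by omega
    have hZ : n < (T.zip L).length := by simp [List.length_zip]; omega
    simp [hTn, hLn, List.take_add_one]

lemma mapbuild_eq_zip (L T : List Int) (h : T.length ≤ L.length) :
    (PySem.List.pyRange 0 (T.length : Int) 1).map
      (fun i => ((PySem.List.pyGet? T i).getD 0, (PySem.List.pyGet? L i).getD 0))
    = T.zip L := by
  rw [PySem.List.pyRange_zero_nat, List.map_map]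
  apply List.ext_getElem
  · simp [List.length_zip]; omega
  · intro i h1 h2
    have hi : i < T.length := by simpa using h1
    have hiL : i < L.length := by omega
    simp [hi, hiL, List.getElem_zip]

-- ===== VERDICT (by name: the statement is the Claim_ definition above) =====
theorem minimizar_latencia_spec : Claim_equal_minimizar_latencia := by
  intro L T _ hpre
  unfold Spec_minimizar_latencia minimizar_latencia minimizar_latencia_alt
  simp only [PySem.List.len_eq]
  have hb := build_eq_zip_take L T hpre T.length (le_refl _)
  have hfull : (T.zip L).take T.length = T.zip L := by
    apply List.take_of_length_le; simp [List.length_zip]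
  rw [hb, hfull, afold_eq_latScan, mapbuild_eq_zip L T hpre,
    pvSchedule_eq (T.zip L).length (T.zip L) (le_refl _)]
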